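-- pv_equiv track=rewrite | github.com/oscarpramos/scov2_inspector | code/SARS-CoV-2_inspector/apps/individual_genomes.py | reformatMutaList
-- ===== SOURCE A (Python) =====
-- def reformatMutaList(genotype, NbrOfMutaLine):
--     MutaTextArray = []
--     for muta in genotype:
--         mutas = muta.split("|")
--         a = 1
--         MutaText = ""
--
--         for mut in mutas:
--                 Concat = [MutaText, mut]
--                 if MutaText == "":
--                         MutaText = mut
--                 elif a > NbrOfMutaLine:
--                         MutaText = "<br>".join(Concat)
--                         a = 1
--                 else:
--                         MutaText = "|".join(Concat)
--                         a += 1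
--         MutaTextArray.append(MutaText)
--
--     MutaTextArray
--     return MutaTextArray
-- ===== SOURCE B (Python) =====
-- def reformatMutaList(genotype, NbrOfMutaLine):
--     k = NbrOfMutaLine + 1
--     if k < 1:
--         k = 1
--     out = []
--     for muta in genotype:
--         tokens = muta.split("|")
--         i = 0
--         while i < len(tokens) and tokens[i] == "":
--             i += 1
--         tokens = tokens[i:]
--         groups = ["|".join(tokens[j:j + k]) for j in range(0, len(tokens), k)]
--         out.append("<br>".join(groups))
--     return out
-- ===== Notes on version B (the rewrite author's own statement) =====
-- stated objective: alternative
-- what changed: Replaces A's stateful counter loop with conditional separators by a declarative decomposition: drop leading empty tokens, chunk the rest into groups of max(NbrOfMutaLine+1,1) tokens, join each group with '|' and the groups with '<br>'.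
import Mathlib
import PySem

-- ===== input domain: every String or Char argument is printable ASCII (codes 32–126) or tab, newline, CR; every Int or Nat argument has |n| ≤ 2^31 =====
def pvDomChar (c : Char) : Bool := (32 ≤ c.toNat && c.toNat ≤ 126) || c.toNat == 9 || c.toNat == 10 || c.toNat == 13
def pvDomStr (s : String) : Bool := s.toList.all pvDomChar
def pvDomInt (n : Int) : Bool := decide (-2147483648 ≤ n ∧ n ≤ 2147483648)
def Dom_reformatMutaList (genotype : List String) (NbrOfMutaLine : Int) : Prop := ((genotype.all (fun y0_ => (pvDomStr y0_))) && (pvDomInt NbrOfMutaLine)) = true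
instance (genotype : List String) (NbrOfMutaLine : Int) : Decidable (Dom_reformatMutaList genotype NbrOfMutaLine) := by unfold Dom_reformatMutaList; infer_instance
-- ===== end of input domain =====

-- A's stateful counter loop with conditional separators is replaced in B by a declarative
-- decomposition: drop leading empty tokens, chunk into groups of max(N+1,1), join with '|' then '<br>'.


-- ===== PORT A =====
-- the inner 'for mut in mutas' loop of A, with state (a, MutaText)
def pvLoopA (N : Int) : List String → Int → String → String
  | [], _, t => t
  | m :: ms, a, t =>
      if t = "" then pvLoopA N ms a m
      else if a > N then pvLoopA N ms 1 (PySem.Str.join "<br>" [t, m])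
      else pvLoopA N ms (a + 1) (PySem.Str.join "|" [t, m])

def reformatMutaList (genotype : List String) (NbrOfMutaLine : Int) : List String :=
  genotype.foldl
    (fun MutaTextArray muta =>
      let mutas := (PySem.Chars.splitOn muta.toList "|".toList).map String.ofList
      MutaTextArray ++ [pvLoopA NbrOfMutaLine mutas 1 ""])
    []

-- ===== PORT B =====
-- tokens[j:j+k] chunking of Source B's comprehension (k ≥ 1 by construction in B)
def pvChunks (k : Nat) : List String → List (List String)
  | [] => []
  | t :: ts => (t :: ts.take (k - 1)) :: pvChunks k (ts.drop (k - 1))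
termination_by ts => ts.length
decreasing_by simp

def pvFmtB (k : Nat) (tokens : List String) : String :=
  PySem.Str.join "<br>" ((pvChunks k tokens).map (PySem.Str.join "|"))

def reformatMutaList_alt (genotype : List String) (NbrOfMutaLine : Int) : List String :=
  let k : Nat := (max (NbrOfMutaLine + 1) 1).toNat    -- k = N+1; if k < 1: k = 1
  genotype.map (fun muta =>
    let tokens := ((PySem.Chars.splitOn muta.toList "|".toList).map String.ofList).dropWhile (· == "")
    pvFmtB k tokens)

-- ===== PRECONDITION & SPEC =====
def Spec_reformatMutaList (genotype : List String) (NbrOfMutaLine : Int) (out : List String) : Prop := out = reformatMutaList_alt genotype NbrOfMutaLine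
instance (genotype : List String) (NbrOfMutaLine : Int) (out : List String) : Decidable (Spec_reformatMutaList genotype NbrOfMutaLine out) := by unfold Spec_reformatMutaList; infer_instance

-- ===== CLAIM (what is proved, stated in full; the proofs are below) =====
def Claim_equal_reformatMutaList : Prop := ∀ (genotype : List String) (NbrOfMutaLine : Int), Dom_reformatMutaList genotype NbrOfMutaLine → Spec_reformatMutaList genotype NbrOfMutaLine (reformatMutaList genotype NbrOfMutaLine)

-- ===== LEMMAS AND PROOFS =====

-- equation lemmas for pvChunks (well-founded recursion)
theorem pvChunks_nil (k : Nat) : pvChunks k [] = [] := by unfold pvChunks; rfl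

theorem pvChunks_cons (k : Nat) (t : String) (ts : List String) :
    pvChunks k (t :: ts) = (t :: ts.take (k - 1)) :: pvChunks k (ts.drop (k - 1)) := by
  conv_lhs => rw [pvChunks]

-- Str-level faces of the PySem.Chars.join lemmas
theorem pvJoin_nil (sep : String) : PySem.Str.join sep [] = "" := by
  apply String.toList_inj.mp; simp [PySem.Str.join, PySem.Chars.join_nil]

theorem pvJoin_singleton (sep m : String) : PySem.Str.join sep [m] = m := by
  apply String.toList_inj.mp; simp [PySem.Str.join, PySem.Chars.join_singleton]

theorem pvJoin_cons_cons (sep p q : String) (r : List String) :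
    PySem.Str.join sep (p :: q :: r) = p ++ sep ++ PySem.Str.join sep (q :: r) := by
  apply String.toList_inj.mp; simp [PySem.Str.join, PySem.Chars.join_cons_cons]

theorem pvJoin_pair (sep t m : String) : PySem.Str.join sep [t, m] = t ++ sep ++ m := by
  rw [pvJoin_cons_cons, pvJoin_singleton]

theorem pvAppend_ne_empty (t m : String) (h : t ≠ "") : t ++ m ≠ "" := by
  intro h2; apply h
  have := congrArg String.toList h2
  simp at this
  exact String.toList_inj.mp (by simp [this.1])

-- the suffix A's loop appends after a nonempty MutaText, when the current group
-- still has room for c more tokens and full groups hold k tokens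
def pvSfx (k : Nat) (c : Nat) (ms : List String) : String :=
  match ms, c with
  | [], _ => ""
  | m :: ms, 0 => "<br>" ++ pvFmtB k (m :: ms)
  | m :: ms, c + 1 => "|" ++ m ++ pvSfx k c ms

-- filling one group with no break: room for all remaining tokens
theorem pvSfx_full (k : Nat) : ∀ (ms : List String) (m : String) (c : Nat), ms.length ≤ c →
    m ++ pvSfx k c ms = PySem.Str.join "|" (m :: ms) := by
  intro ms
  induction ms with
  | nil => intro m c _; rw [pvJoin_singleton]; apply String.toList_inj.mp; simp [pvSfx]
  | cons u ms ih =>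
    intro m c hc
    cases c with
    | zero => simp at hc
    | succ c =>
      rw [pvJoin_cons_cons, ← ih u c (by simp at hc; omega)]
      show m ++ ("|" ++ u ++ pvSfx k c ms) = _
      apply String.toList_inj.mp; simp

-- filling exactly ms1.length tokens then hitting the break
theorem pvSfx_break (k : Nat) : ∀ (ms1 : List String) (m : String) (ms2 : List String),
    m ++ pvSfx k ms1.length (ms1 ++ ms2) = PySem.Str.join "|" (m :: ms1) ++ pvSfx k 0 ms2 := by
  intro ms1
  induction ms1 with
  | nil => intro m ms2; rw [pvJoin_singleton]; cases ms2 <;> simp [pvSfx]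
  | cons u ms1 ih =>
    intro m ms2
    rw [pvJoin_cons_cons]
    show m ++ ("|" ++ u ++ pvSfx k (ms1.length) (ms1 ++ ms2)) = _
    have h' := congrArg String.toList (ih u ms2)
    apply String.toList_inj.mp
    simp at h' ⊢
    simp [h']

-- B's chunked format of a nonempty token list, expressed through pvSfx
theorem pvFmtB_cons (k : Nat) (hk : 1 ≤ k) : ∀ (ms : List String) (m : String),
    pvFmtB k (m :: ms) = m ++ pvSfx k (k - 1) ms := by
  intro ms
  induction hn : ms.length using Nat.strong_induction_on generalizing ms with
  | _ n ih =>
  intro m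
  rw [pvFmtB, pvChunks_cons]
  by_cases hlen : ms.length ≤ k - 1
  · have hdrop : ms.drop (k - 1) = [] := by simp [List.drop_eq_nil_iff]; omega
    have htake : ms.take (k - 1) = ms := List.take_of_length_le hlen
    rw [hdrop, htake, pvChunks_nil]
    simp only [List.map]
    rw [pvJoin_singleton, ← pvSfx_full k ms m (k - 1) hlen]
  · rw [not_le] at hlen
    obtain ⟨u, rest, hdrop⟩ : ∃ u rest, ms.drop (k - 1) = u :: rest := by
      cases h : ms.drop (k - 1) with
      | nil => rw [List.drop_eq_nil_iff] at h; omega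
      | cons u rest => exact ⟨u, rest, rfl⟩
    rw [hdrop, pvChunks_cons]
    simp only [List.map]
    rw [pvJoin_cons_cons]
    have hrest : rest.length < n := by
      have := congrArg List.length hdrop
      simp at this; omega
    have hms : ms = ms.take (k - 1) ++ (u :: rest) := by rw [← hdrop, List.take_append_drop]
    have hlt : (ms.take (k - 1)).length = k - 1 := by simp; omega
    have hB : pvFmtB k (u :: rest) = u ++ pvSfx k (k - 1) rest := ih rest.length hrest rest rfl u
    rw [pvFmtB, pvChunks_cons] at hB
    simp only [List.map] at hB
    rw [hB]
    have hbrk := pvSfx_break k (ms.take (k - 1)) m (u :: rest)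
    rw [hlt] at hbrk
    conv_rhs => rw [hms, hbrk]
    rw [show pvSfx k 0 (u :: rest) = "<br>" ++ pvFmtB k (u :: rest) from rfl]
    rw [pvFmtB, pvChunks_cons]
    simp only [List.map]
    rw [hB]
    apply String.toList_inj.mp; simp

-- the loop invariant: with a nonempty MutaText and counter a ≥ 1, A's loop appends pvSfx
theorem pvLoopA_inv (N : Int) (k : Nat) (hk : (k : Int) = max (N + 1) 1) :
    ∀ (ms : List String) (a : Int) (t : String), t ≠ "" → 1 ≤ a →
      pvLoopA N ms a t = t ++ pvSfx k ((N + 1 - a).toNat) ms := by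
  intro ms
  induction ms with
  | nil => intro a t ht ha; apply String.toList_inj.mp; simp [pvLoopA, pvSfx]
  | cons m ms ih =>
    intro a t ht ha
    rw [pvLoopA]
    rw [if_neg ht]
    by_cases hab : a > N
    · rw [if_pos hab]
      have hc : (N + 1 - a).toNat = 0 := by omega
      have hk1 : (N + 1 - 1).toNat = k - 1 := by omega
      rw [ih 1 _ (by rw [pvJoin_pair]; exact pvAppend_ne_empty _ _ (pvAppend_ne_empty _ _ ht)) le_rfl]
      rw [pvJoin_pair, hc, hk1]
      rw [show pvSfx k 0 (m :: ms) = "<br>" ++ pvFmtB k (m :: ms) from rfl]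
      rw [pvFmtB_cons k (by omega) ms m]
      apply String.toList_inj.mp; simp
    · rw [if_neg hab]
      have hc : (N + 1 - a).toNat = (N + 1 - (a + 1)).toNat + 1 := by omega
      rw [ih (a + 1) _ (by rw [pvJoin_pair]; exact pvAppend_ne_empty _ _ (pvAppend_ne_empty _ _ ht)) (by omega)]
      rw [pvJoin_pair, hc]
      rw [show pvSfx k ((N + 1 - (a + 1)).toNat + 1) (m :: ms) =
            "|" ++ m ++ pvSfx k ((N + 1 - (a + 1)).toNat) ms from rfl]
      apply String.toList_inj.mp; simp

-- per-entry agreement, over an arbitrary token list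
theorem pvEntry (N : Int) (k : Nat) (hk : (k : Int) = max (N + 1) 1) :
    ∀ toks : List String, pvLoopA N toks 1 "" = pvFmtB k (toks.dropWhile (· == "")) := by
  intro toks
  induction toks with
  | nil =>
    simp only [pvLoopA, List.dropWhile, pvFmtB]
    rw [pvChunks_nil, List.map_nil, pvJoin_nil]
  | cons m ms ih =>
    rw [pvLoopA, if_pos rfl]
    by_cases hm : m = ""
    · subst hm
      rw [List.dropWhile_cons_of_pos (by simp)]
      -- leading empty token: MutaText stays "", loop state unchanged
      cases ms with
      | nil => simpa [pvLoopA] using ih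
      | cons u us => simpa [pvLoopA] using ih
    · rw [List.dropWhile_cons_of_neg (by simp [hm])]
      rw [pvFmtB_cons k (by omega) ms m]
      rw [pvLoopA_inv N k hk ms 1 m hm le_rfl]
      have : (N + 1 - 1).toNat = k - 1 := by omega
      rw [this]

-- ===== VERDICT (by name: the statement is the Claim_ definition above) =====
theorem reformatMutaList_spec : Claim_equal_reformatMutaList := by
  intro genotype N _
  unfold Spec_reformatMutaList reformatMutaList reformatMutaList_alt
  rw [PySem.List.foldl_append_singleton_eq_map]
  apply List.map_congr_left
  intro muta _
  exact pvEntry N _ (by omega) _
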